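-- pv_equiv track=rewrite | github.com/ShellyREn/NLP-Project | GenerateQuestions.py | checkSentenceType
-- ===== SOURCE A (Python) =====
-- def checkSentenceType(sentence, dep_dict, ner_tag_dict, root):
-- 	possible_types = set()
-- 	if ("TIME" in ner_tag_dict.values()) or (
-- 			"DATE" in ner_tag_dict.values()):
-- 		possible_types.add("When")
-- 	if ("PERSON" in ner_tag_dict.values()):
-- 		possible_types.add("Who")
-- 	if ("FAC" in ner_tag_dict.values()) or (
-- 			"ORG" in ner_tag_dict.values()) or (
-- 			"LOC" in ner_tag_dict.values()) or (
-- 			"GPE" in ner_tag_dict.values()):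
-- 		possible_types.add("Where")
-- 	if ("MONEY" in ner_tag_dict.values()):
-- 		possible_types.add("How much")
-- 	if ("DATE" in ner_tag_dict.values()):
-- 		possible_types.add("How long")
-- 	if ("CARDINAL" in ner_tag_dict.values()):
-- 		possible_types.add("How many")
-- 		possible_types.add("How often")
-- 	if ("because" in sentence) or ("due to" in sentence) or (
-- 			"Due to" in sentence) or ("since" in sentence):
-- 		possible_types.add("Why")
-- 	aux_verbs = {"are", "is", "was", "were", "shall", "do", "does", "did",
-- 				 "can", "could", "have", "need", "should", "will", "would",
-- 				 "must", "may", "might", "cannot"}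
-- 	if root in aux_verbs:
-- 		possible_types.add("What")
-- 	for dep in dep_dict.values():
-- 		if dep[0] == 'nsubj':
-- 			possible_types.add("What")
-- 	return possible_types
-- ===== SOURCE B (Python) =====
-- # Bitmask-based reimplementation: one pass over the NER tags ORs per-tag bit
-- # masks into an integer, the remaining cues set further bits, and the answer
-- # set is decoded from the final mask.
--
-- _TAG_BITS = {"TIME": 1, "DATE": 1 | 16, "PERSON": 2, "FAC": 4, "ORG": 4,
--              "LOC": 4, "GPE": 4, "MONEY": 8, "CARDINAL": 32 | 64}
--
-- _TYPE_BITS = [("When", 1), ("Who", 2), ("Where", 4), ("How much", 8),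
--               ("How long", 16), ("How many", 32), ("How often", 64),
--               ("Why", 128), ("What", 256)]
--
-- _WHY_CUES = ("because", "due to", "Due to", "since")
--
-- _AUX_VERBS = frozenset(["are", "is", "was", "were", "shall", "do", "does",
--                         "did", "can", "could", "have", "need", "should",
--                         "will", "would", "must", "may", "might", "cannot"])
--
--
-- def checkSentenceType(sentence, dep_dict, ner_tag_dict, root):
--     mask = 0
--     for tag in ner_tag_dict.values():
--         mask |= _TAG_BITS.get(tag, 0)
--     if any(cue in sentence for cue in _WHY_CUES):
--         mask |= 128
--     if root in _AUX_VERBS or any(dep[:1] == ["nsubj"] for dep in dep_dict.values()):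
--         mask |= 256
--     return {q for q, bit in _TYPE_BITS if mask & bit}
-- ===== Notes on version B (the rewrite author's own statement) =====
-- stated objective: alternative
-- what changed: Replaces A's set-of-strings built by ~10 repeated membership scans over ner_tag_dict.values() with an integer bitmask: one pass ORs a per-tag bit pattern from a static tag->bits dict, the Why/What cues set two more bits, and the result set is decoded from the mask against a (type, bit) table.
import Mathlib
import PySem

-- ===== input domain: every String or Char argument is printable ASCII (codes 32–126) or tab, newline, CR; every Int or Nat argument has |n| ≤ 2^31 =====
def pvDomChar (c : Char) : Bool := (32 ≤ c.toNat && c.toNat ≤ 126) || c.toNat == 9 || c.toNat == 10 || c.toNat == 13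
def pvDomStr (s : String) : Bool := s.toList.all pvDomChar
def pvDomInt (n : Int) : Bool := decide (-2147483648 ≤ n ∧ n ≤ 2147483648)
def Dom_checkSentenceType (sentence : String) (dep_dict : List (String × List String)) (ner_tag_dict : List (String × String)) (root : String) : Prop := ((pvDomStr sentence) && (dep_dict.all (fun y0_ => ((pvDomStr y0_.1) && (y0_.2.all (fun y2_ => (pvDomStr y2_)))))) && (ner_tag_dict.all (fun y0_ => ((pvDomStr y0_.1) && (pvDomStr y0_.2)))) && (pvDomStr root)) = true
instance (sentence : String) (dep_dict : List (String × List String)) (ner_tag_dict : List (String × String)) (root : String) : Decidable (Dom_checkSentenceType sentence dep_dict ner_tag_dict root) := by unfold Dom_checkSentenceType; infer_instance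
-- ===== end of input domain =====

-- B replaces A's set built by ~10 repeated membership scans of ner_tag_dict.values() with an
-- integer bitmask accumulated in one pass over the tags and decoded against a (type, bit) table
-- (objective: alternative algorithm / data structure).

-- ===== PORT A =====
def pvAuxVerbs : List String :=
  ["are", "is", "was", "were", "shall", "do", "does", "did",
   "can", "could", "have", "need", "should", "will", "would",
   "must", "may", "might", "cannot"]

-- dep[0] raises IndexError on an empty dep; Pre_ excludes that, the port reads a default there
def checkSentenceType (sentence : String) (dep_dict : List (String × List String)) (ner_tag_dict : List (String × String)) (root : String) : List String :=
  let vals := PySem.Dict.values (PySem.Dict.ofList ner_tag_dict)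
  let pt : PySem.Set String := PySem.Set.empty
  let pt := if vals.contains "TIME" || vals.contains "DATE" then PySem.Set.add pt "When" else pt
  let pt := if vals.contains "PERSON" then PySem.Set.add pt "Who" else pt
  let pt := if vals.contains "FAC" || vals.contains "ORG" || vals.contains "LOC" || vals.contains "GPE" then PySem.Set.add pt "Where" else pt
  let pt := if vals.contains "MONEY" then PySem.Set.add pt "How much" else pt
  let pt := if vals.contains "DATE" then PySem.Set.add pt "How long" else pt
  let pt := if vals.contains "CARDINAL" then PySem.Set.add (PySem.Set.add pt "How many") "How often" else pt
  let pt := if PySem.Str.isIn "because" sentence || PySem.Str.isIn "due to" sentence || PySem.Str.isIn "Due to" sentence || PySem.Str.isIn "since" sentence then PySem.Set.add pt "Why" else pt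
  let aux_verbs : PySem.Set String := PySem.Set.ofList pvAuxVerbs
  let pt := if PySem.Set.contains aux_verbs root then PySem.Set.add pt "What" else pt
  let pt := (PySem.Dict.values (PySem.Dict.ofList dep_dict)).foldl
    (fun pt dep => if ((PySem.List.pyGet? dep 0).getD "") == "nsubj" then PySem.Set.add pt "What" else pt) pt
  pt

-- ===== PORT B =====
def pvTagBits : List (String × Nat) :=
  [("TIME", 1), ("DATE", 17), ("PERSON", 2), ("FAC", 4), ("ORG", 4),
   ("LOC", 4), ("GPE", 4), ("MONEY", 8), ("CARDINAL", 96)]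

def pvTypeBits : List (String × Nat) :=
  [("When", 1), ("Who", 2), ("Where", 4), ("How much", 8),
   ("How long", 16), ("How many", 32), ("How often", 64),
   ("Why", 128), ("What", 256)]

def pvWhyCues : List String := ["because", "due to", "Due to", "since"]

def checkSentenceType_alt (sentence : String) (dep_dict : List (String × List String)) (ner_tag_dict : List (String × String)) (root : String) : List String :=
  let tbl := PySem.Dict.ofList pvTagBits
  let mask : Nat := (PySem.Dict.values (PySem.Dict.ofList ner_tag_dict)).foldl
    (fun m tag => m ||| PySem.Dict.getD tbl tag 0) 0
  let mask := if pvWhyCues.any (fun cue => PySem.Str.isIn cue sentence) then mask ||| 128 else mask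
  let mask := if pvAuxVerbs.contains root
                || (PySem.Dict.values (PySem.Dict.ofList dep_dict)).any (fun dep => PySem.List.slice dep (some 0) (some 1) == ["nsubj"])
              then mask ||| 256 else mask
  PySem.Set.ofList ((pvTypeBits.filter (fun qb => mask &&& qb.2 != 0)).map Prod.fst)

-- ===== PRECONDITION & SPEC =====
-- Pre_ excludes exactly the inputs on which A raises IndexError at dep[0]: some value of dep_dict is an empty list (B simply finds no nsubj there)
def Pre_checkSentenceType (sentence : String) (dep_dict : List (String × List String)) (ner_tag_dict : List (String × String)) (root : String) : Prop :=
  (PySem.Dict.values (PySem.Dict.ofList dep_dict)).all (fun dep => !List.isEmpty dep) = true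
instance (sentence : String) (dep_dict : List (String × List String)) (ner_tag_dict : List (String × String)) (root : String) : Decidable (Pre_checkSentenceType sentence dep_dict ner_tag_dict root) := by unfold Pre_checkSentenceType; infer_instance

def pvWitness_checkSentenceType : String × (List (String × List String)) × (List (String × String)) × String :=
  ("He ran because it rained", [("ran", ["nsubj"])], [("Paris", "GPE")], "ran")

def Spec_checkSentenceType (sentence : String) (dep_dict : List (String × List String)) (ner_tag_dict : List (String × String)) (root : String) (out : List String) : Prop := out = checkSentenceType_alt sentence dep_dict ner_tag_dict root
instance (sentence : String) (dep_dict : List (String × List String)) (ner_tag_dict : List (String × String)) (root : String) (out : List String) : Decidable (Spec_checkSentenceType sentence dep_dict ner_tag_dict root out) := by unfold Spec_checkSentenceType; infer_instance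

-- ===== CLAIM (what is proved, stated in full; the proofs are below) =====
def Claim_equal_checkSentenceType : Prop := ∀ (sentence : String) (dep_dict : List (String × List String)) (ner_tag_dict : List (String × String)) (root : String), Dom_checkSentenceType sentence dep_dict ner_tag_dict root → Pre_checkSentenceType sentence dep_dict ner_tag_dict root → Spec_checkSentenceType sentence dep_dict ner_tag_dict root (checkSentenceType sentence dep_dict ner_tag_dict root)

-- ===== LEMMAS AND PROOFS =====

-- A's for-loop over dep values collapses to a single conditional add
theorem pv_foldl_add (l : List (List String)) (p : List String → Bool) (x : String) (s : PySem.Set String) :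
    l.foldl (fun pt dep => if p dep then PySem.Set.add pt x else pt) s
      = if l.any p then PySem.Set.add s x else s := by
  induction l generalizing s with
  | nil => simp
  | cons hd tl ih =>
    simp only [List.foldl_cons, List.any_cons, ih]
    by_cases h : p hd <;> by_cases h2 : tl.any p <;>
      simp [h, h2]

-- A's dep[0] test and B's dep[:1] test agree on every list
theorem pv_pred_eq (dep : List String) :
    (((PySem.List.pyGet? dep 0).getD "") == "nsubj")
      = (PySem.List.slice dep (some 0) (some 1) == ["nsubj"]) := by
  cases dep with
  | nil => decide
  | cons h t => simp [PySem.List.pyGet?, PySem.List.pyIdx?, PySem.List.slice]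

theorem pv_contains_ofList (xs : List String) (x : String) :
    PySem.Set.contains (PySem.Set.ofList xs) x = xs.contains x := by
  by_cases h : x ∈ xs <;>
    simp [PySem.Set.contains_eq_listContains, PySem.Set.mem_ofList, h]

-- mask &&& 2^k tests bit k
theorem pv_and_pow (m k : Nat) : (m &&& 2^k != 0) = m.testBit k := by
  simp [Nat.and_two_pow]
  cases h : m.testBit k <;> simp

theorem pv_bit1 (m : Nat) : (m &&& 1 != 0) = m.testBit 0 := by
  rw [show (1:Nat) = 2^0 by norm_num, pv_and_pow]
theorem pv_bit2 (m : Nat) : (m &&& 2 != 0) = m.testBit 1 := by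
  rw [show (2:Nat) = 2^1 by norm_num, pv_and_pow]
theorem pv_bit4 (m : Nat) : (m &&& 4 != 0) = m.testBit 2 := by
  rw [show (4:Nat) = 2^2 by norm_num, pv_and_pow]
theorem pv_bit8 (m : Nat) : (m &&& 8 != 0) = m.testBit 3 := by
  rw [show (8:Nat) = 2^3 by norm_num, pv_and_pow]
theorem pv_bit16 (m : Nat) : (m &&& 16 != 0) = m.testBit 4 := by
  rw [show (16:Nat) = 2^4 by norm_num, pv_and_pow]
theorem pv_bit32 (m : Nat) : (m &&& 32 != 0) = m.testBit 5 := by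
  rw [show (32:Nat) = 2^5 by norm_num, pv_and_pow]
theorem pv_bit64 (m : Nat) : (m &&& 64 != 0) = m.testBit 6 := by
  rw [show (64:Nat) = 2^6 by norm_num, pv_and_pow]
theorem pv_bit128 (m : Nat) : (m &&& 128 != 0) = m.testBit 7 := by
  rw [show (128:Nat) = 2^7 by norm_num, pv_and_pow]
theorem pv_bit256 (m : Nat) : (m &&& 256 != 0) = m.testBit 8 := by
  rw [show (256:Nat) = 2^8 by norm_num, pv_and_pow]

-- testBit through the conditional OR of a constant
theorem pv_testBit_ite (c : Bool) (m b i : Nat) :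
    (if c then m ||| b else m).testBit i = ((c && b.testBit i) || m.testBit i) := by
  cases c <;> simp [Nat.testBit_or, Bool.or_comm]

-- a bit of the OR-fold is set iff some element contributes it
theorem pv_testBit_foldl (l : List String) (f : String → Nat) (i : Nat) (s : Nat) :
    (l.foldl (fun m tag => m ||| f tag) s).testBit i
      = (s.testBit i || l.any (fun tag => (f tag).testBit i)) := by
  induction l generalizing s with
  | nil => simp
  | cons hd tl ih => simp [List.foldl_cons, ih, Nat.testBit_or, Bool.or_assoc]

-- any distributes over disjunctive predicates
theorem pv_any_or (l : List String) (p q : String → Bool) :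
    (l.any fun t => p t || q t) = (l.any p || l.any q) := by
  induction l with
  | nil => rfl
  | cons h t ih =>
    simp only [List.any_cons, ih]
    cases p h <;> cases q h <;> cases t.any p <;> cases t.any q <;> rfl

theorem pv_any_false (l : List String) : (l.any fun _ => false) = false := by
  simp

-- the tag table, bit by bit
theorem pv_tag_bit0 (tag : String) :
    (PySem.Dict.getD (PySem.Dict.ofList pvTagBits) tag 0).testBit 0
      = (tag == "TIME" || tag == "DATE") := by
  simp only [pvTagBits, PySem.Dict.getD_eq_get?_getD, PySem.Dict.ofList, PySem.Dict.update,
    List.foldl_cons, List.foldl_nil, PySem.Dict.get?_insert, PySem.Dict.get?_empty]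
  split_ifs <;> simp_all <;> decide
theorem pv_tag_bit1 (tag : String) :
    (PySem.Dict.getD (PySem.Dict.ofList pvTagBits) tag 0).testBit 1 = (tag == "PERSON") := by
  simp only [pvTagBits, PySem.Dict.getD_eq_get?_getD, PySem.Dict.ofList, PySem.Dict.update,
    List.foldl_cons, List.foldl_nil, PySem.Dict.get?_insert, PySem.Dict.get?_empty]
  split_ifs <;> simp_all <;> decide
theorem pv_tag_bit2 (tag : String) :
    (PySem.Dict.getD (PySem.Dict.ofList pvTagBits) tag 0).testBit 2
      = (tag == "FAC" || tag == "ORG" || tag == "LOC" || tag == "GPE") := by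
  simp only [pvTagBits, PySem.Dict.getD_eq_get?_getD, PySem.Dict.ofList, PySem.Dict.update,
    List.foldl_cons, List.foldl_nil, PySem.Dict.get?_insert, PySem.Dict.get?_empty]
  split_ifs <;> simp_all <;> decide
theorem pv_tag_bit3 (tag : String) :
    (PySem.Dict.getD (PySem.Dict.ofList pvTagBits) tag 0).testBit 3 = (tag == "MONEY") := by
  simp only [pvTagBits, PySem.Dict.getD_eq_get?_getD, PySem.Dict.ofList, PySem.Dict.update,
    List.foldl_cons, List.foldl_nil, PySem.Dict.get?_insert, PySem.Dict.get?_empty]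
  split_ifs <;> simp_all <;> decide
theorem pv_tag_bit4 (tag : String) :
    (PySem.Dict.getD (PySem.Dict.ofList pvTagBits) tag 0).testBit 4 = (tag == "DATE") := by
  simp only [pvTagBits, PySem.Dict.getD_eq_get?_getD, PySem.Dict.ofList, PySem.Dict.update,
    List.foldl_cons, List.foldl_nil, PySem.Dict.get?_insert, PySem.Dict.get?_empty]
  split_ifs <;> simp_all <;> decide
theorem pv_tag_bit5 (tag : String) :
    (PySem.Dict.getD (PySem.Dict.ofList pvTagBits) tag 0).testBit 5 = (tag == "CARDINAL") := by
  simp only [pvTagBits, PySem.Dict.getD_eq_get?_getD, PySem.Dict.ofList, PySem.Dict.update,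
    List.foldl_cons, List.foldl_nil, PySem.Dict.get?_insert, PySem.Dict.get?_empty]
  split_ifs <;> simp_all <;> decide
theorem pv_tag_bit6 (tag : String) :
    (PySem.Dict.getD (PySem.Dict.ofList pvTagBits) tag 0).testBit 6 = (tag == "CARDINAL") := by
  simp only [pvTagBits, PySem.Dict.getD_eq_get?_getD, PySem.Dict.ofList, PySem.Dict.update,
    List.foldl_cons, List.foldl_nil, PySem.Dict.get?_insert, PySem.Dict.get?_empty]
  split_ifs <;> simp_all <;> decide
theorem pv_tag_bit7 (tag : String) :
    (PySem.Dict.getD (PySem.Dict.ofList pvTagBits) tag 0).testBit 7 = false := by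
  simp only [pvTagBits, PySem.Dict.getD_eq_get?_getD, PySem.Dict.ofList, PySem.Dict.update,
    List.foldl_cons, List.foldl_nil, PySem.Dict.get?_insert, PySem.Dict.get?_empty]
  split_ifs <;> simp_all <;> decide
theorem pv_tag_bit8 (tag : String) :
    (PySem.Dict.getD (PySem.Dict.ofList pvTagBits) tag 0).testBit 8 = false := by
  simp only [pvTagBits, PySem.Dict.getD_eq_get?_getD, PySem.Dict.ofList, PySem.Dict.update,
    List.foldl_cons, List.foldl_nil, PySem.Dict.get?_insert, PySem.Dict.get?_empty]
  split_ifs <;> simp_all <;> decide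

-- ===== VERDICT =====
set_option maxHeartbeats 2000000 in
theorem checkSentenceType_spec : Claim_equal_checkSentenceType := by
  intro sentence dep_dict ner_tag_dict root _ _
  unfold Spec_checkSentenceType checkSentenceType checkSentenceType_alt
  simp only [pv_foldl_add, pv_pred_eq, pv_contains_ofList, pvWhyCues, pvTypeBits,
    List.filter_cons, List.filter_nil, List.map_cons, List.map_nil,
    List.any_cons, List.any_nil, Bool.or_false,
    pv_bit1, pv_bit2, pv_bit4, pv_bit8, pv_bit16, pv_bit32, pv_bit64, pv_bit128, pv_bit256,
    pv_testBit_ite, pv_testBit_foldl, Nat.zero_testBit,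
    pv_tag_bit0, pv_tag_bit1, pv_tag_bit2, pv_tag_bit3, pv_tag_bit4, pv_tag_bit5,
    pv_tag_bit6, pv_tag_bit7, pv_tag_bit8,
    show Nat.testBit 128 0 = false from rfl, show Nat.testBit 128 1 = false from rfl,
    show Nat.testBit 128 2 = false from rfl, show Nat.testBit 128 3 = false from rfl,
    show Nat.testBit 128 4 = false from rfl, show Nat.testBit 128 5 = false from rfl,
    show Nat.testBit 128 6 = false from rfl, show Nat.testBit 128 7 = true from rfl,
    show Nat.testBit 128 8 = false from rfl,
    show Nat.testBit 256 0 = false from rfl, show Nat.testBit 256 1 = false from rfl,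
    show Nat.testBit 256 2 = false from rfl, show Nat.testBit 256 3 = false from rfl,
    show Nat.testBit 256 4 = false from rfl, show Nat.testBit 256 5 = false from rfl,
    show Nat.testBit 256 6 = false from rfl, show Nat.testBit 256 7 = false from rfl,
    show Nat.testBit 256 8 = true from rfl,
    pv_any_or, List.any_beq', pv_any_false,
    Bool.and_true, Bool.and_false, Bool.false_or, Bool.or_false, Bool.or_assoc]
  generalize (PySem.Dict.ofList ner_tag_dict).values.contains "TIME" = bTIME
  generalize (PySem.Dict.ofList ner_tag_dict).values.contains "DATE" = bDATE
  generalize (PySem.Dict.ofList ner_tag_dict).values.contains "PERSON" = bPERSON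
  generalize (PySem.Dict.ofList ner_tag_dict).values.contains "FAC" = bFAC
  generalize (PySem.Dict.ofList ner_tag_dict).values.contains "ORG" = bORG
  generalize (PySem.Dict.ofList ner_tag_dict).values.contains "LOC" = bLOC
  generalize (PySem.Dict.ofList ner_tag_dict).values.contains "GPE" = bGPE
  generalize (PySem.Dict.ofList ner_tag_dict).values.contains "MONEY" = bMONEY
  generalize (PySem.Dict.ofList ner_tag_dict).values.contains "CARDINAL" = bCARD
  generalize (PySem.Str.isIn "because" sentence || (PySem.Str.isIn "due to" sentence || (PySem.Str.isIn "Due to" sentence || PySem.Str.isIn "since" sentence))) = bWhy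
  generalize pvAuxVerbs.contains root = bAux
  generalize ((PySem.Dict.ofList dep_dict).values.any fun dep => PySem.List.slice dep (some 0) (some 1) == ["nsubj"]) = bN
  revert bTIME bDATE bPERSON bFAC bORG bLOC bGPE bMONEY bCARD bWhy bAux bN
  decide
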